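-- pv_equiv track=rewrite | github.com/ShapeLayer/training | tasks/online_judge/baekjoon/python/2212.py | compute
-- ===== SOURCE A (Python) =====
-- def compute(N: int, K: int, coords: list):
--     if K >= N:
--         return 0
--
--     coords.sort()
--
--     dist = [coords[i] - coords[i - 1] for i in range(1, N)]
--     dist.sort()
--
--     for i in range(K - 1):
--         dist.pop()
--
--     return sum(dist)
-- ===== SOURCE B (Python) =====
-- def _sum_smallest(n, xs):
--     # sum of the n smallest values of xs, by quickselect-style 3-way partitioning
--     if n <= 0 or not xs:
--         return 0
--     pivot = xs[0]
--     less = [x for x in xs if x < pivot]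
--     greater = [x for x in xs if x > pivot]
--     if n <= len(less):
--         return _sum_smallest(n, less)
--     neq = len(xs) - len(less) - len(greater)
--     return sum(less) + pivot * min(n - len(less), neq) + _sum_smallest(n - len(less) - neq, greater)
--
--
-- def compute(N: int, K: int, coords: list):
--     if K >= N:
--         return 0
--     coords.sort()
--     gaps = [coords[i] - coords[i - 1] for i in range(1, N)]
--     return _sum_smallest(N - K, gaps)
-- ===== Notes on version B (the rewrite author's own statement) =====
-- stated objective: alternative
-- what changed: B never sorts the gap list: instead of A's sort-then-pop-the-K-1-largest, B computes the sum of the N-K smallest gaps directly by a recursive quickselect-style 3-way partition around a pivot (O(n) average, no ordering of the gaps ever built).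
import Mathlib
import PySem

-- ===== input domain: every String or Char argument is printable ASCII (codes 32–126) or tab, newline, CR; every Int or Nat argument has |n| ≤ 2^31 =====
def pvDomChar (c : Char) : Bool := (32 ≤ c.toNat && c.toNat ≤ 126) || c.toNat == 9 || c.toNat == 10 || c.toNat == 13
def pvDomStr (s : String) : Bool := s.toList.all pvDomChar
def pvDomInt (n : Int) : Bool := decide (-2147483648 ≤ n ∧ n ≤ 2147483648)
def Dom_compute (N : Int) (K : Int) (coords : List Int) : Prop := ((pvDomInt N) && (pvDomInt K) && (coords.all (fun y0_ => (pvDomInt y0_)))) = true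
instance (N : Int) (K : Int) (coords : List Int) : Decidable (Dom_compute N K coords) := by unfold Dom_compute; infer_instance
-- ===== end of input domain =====

-- B never builds a sorted gap list: it computes the sum of the N-K smallest gaps directly by a
-- recursive quickselect-style 3-way partition around a pivot (objective: alternative).
-- Both A and B sort `coords` in place; the equivalence proved here is about the return value.

-- ===== PORT A =====
def compute (N : Int) (K : Int) (coords : List Int) : Int :=
  if K ≥ N then 0
  else
    let cs := PySem.List.sorted coords (fun x => x) false
    -- pyGetD with default 0: indices are in range on Pre_ (outside Pre_ the Python raises IndexError)
    let dist := (PySem.List.pyRange 1 N 1).map (fun i =>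
      PySem.List.pyGetD cs i 0 - PySem.List.pyGetD cs (i - 1) 0)
    let dist₁ := PySem.List.sorted dist (fun x => x) false
    -- for i in range(K-1): dist.pop()    (pop? = none is IndexError on an empty list; never hit, since K < N)
    let dist₂ := (PySem.List.pyRange 0 (K - 1) 1).foldl (fun d _ =>
      match PySem.List.pop? d (-1) with
      | some (_, rest) => rest
      | none => d) dist₁
    dist₂.sum

-- ===== PORT B =====
-- _sum_smallest(n, xs): sum of the n smallest values of xs by 3-way partition around xs[0]
def sumSmallest (n : Int) (xs : List Int) : Int :=
  if n ≤ 0 ∨ xs = [] then 0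
  else
    let pivot := PySem.List.pyGetD xs 0 0
    let less := xs.filter (fun x => decide (x < pivot))
    let greater := xs.filter (fun x => decide (pivot < x))
    if n ≤ (less.length : Int) then sumSmallest n less
    else
      let neq : Int := (xs.length : Int) - less.length - greater.length
      less.sum + pivot * min (n - (less.length : Int)) neq + sumSmallest (n - less.length - neq) greater
  termination_by xs.length
  decreasing_by
  all_goals
    rcases xs with _ | ⟨a, t⟩
    · simp_all
    · simp only [List.length_unattach]
      rw [show (a :: t).length = (a :: t).attach.length from (List.length_attach).symm]
      refine List.length_filter_lt_length_iff_exists.mpr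
        ⟨⟨a, List.mem_cons_self⟩, List.mem_attach _ _, ?_⟩
      simp [PySem.List.pyGetD, PySem.List.pyGet?, PySem.List.pyIdx?]

def compute_alt (N : Int) (K : Int) (coords : List Int) : Int :=
  if K ≥ N then 0
  else
    let cs := PySem.List.sorted coords (fun x => x) false
    let gaps := (PySem.List.pyRange 1 N 1).map (fun i =>
      PySem.List.pyGetD cs i 0 - PySem.List.pyGetD cs (i - 1) 0)
    sumSmallest (N - K) gaps

-- ===== PRECONDITION & SPEC =====
-- Pre_ excludes exactly the inputs where A raises IndexError: K < N with N exceeding both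
-- len(coords) and 1, where the comprehension indexes coords out of range.
def Pre_compute (N : Int) (K : Int) (coords : List Int) : Prop :=
  K ≥ N ∨ N ≤ (coords.length : Int) ∨ N ≤ 1
instance (N : Int) (K : Int) (coords : List Int) : Decidable (Pre_compute N K coords) := by
  unfold Pre_compute; infer_instance

def pvWitness_compute : Int × Int × List Int := (3, 2, [1, 5, 7])

def Spec_compute (N : Int) (K : Int) (coords : List Int) (out : Int) : Prop := out = compute_alt N K coords
instance (N : Int) (K : Int) (coords : List Int) (out : Int) : Decidable (Spec_compute N K coords out) := by unfold Spec_compute; infer_instance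

-- ===== CLAIM (what is proved, stated in full; the proofs are below) =====
def Claim_equal_compute : Prop := ∀ (N : Int) (K : Int) (coords : List Int), Dom_compute N K coords → Pre_compute N K coords → Spec_compute N K coords (compute N K coords)

-- ===== LEMMAS AND PROOFS =====

-- Popping the last element k times from a list of length ≥ k leaves its first (length - k) elements.
theorem pv_popFold (k : Nat) (l : List Int) (hk : k ≤ l.length) :
    (PySem.List.pyRange 0 (k : Int) 1).foldl (fun d _ =>
      match PySem.List.pop? d (-1) with
      | some (_, rest) => rest
      | none => d) l = l.take (l.length - k) := by
  induction k with
  | zero => simp [PySem.List.pyRange_one_eq_nil]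
  | succ k ih =>
    have hk' : k ≤ l.length := Nat.le_of_succ_le hk
    have hcast : ((k + 1 : Nat) : Int) = (k : Int) + 1 := by push_cast; ring
    rw [hcast, PySem.List.pyRange_one_succ_right (by positivity), List.foldl_append, ih hk']
    have hm : l.length - k = (l.length - (k + 1)) + 1 := by omega
    have hsplit : l.take (l.length - k)
        = l.take (l.length - (k + 1)) ++ [l[l.length - (k + 1)]'(by omega)] := by
      rw [hm]
      exact List.take_succ_eq_append_getElem (by omega)
    simp only [List.foldl_cons, List.foldl_nil]
    rw [hsplit, PySem.List.pop?_last]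

-- 3-way-partition decomposition of a sorted list:
-- sorted xs = sorted (xs < p) ++ replicate (count p) p ++ sorted (xs > p)
theorem pv_sorted_decomp (xs : List Int) (p : Int) :
    PySem.List.sorted xs (fun x => x) false
      = PySem.List.sorted (xs.filter (fun x => decide (x < p))) (fun x => x) false
        ++ (List.replicate (xs.count p) p
        ++ PySem.List.sorted (xs.filter (fun x => decide (p < x))) (fun x => x) false) := by
  apply PySem.List.sorted_id_eq_of_perm_of_pairwise
  · apply List.perm_iff_count.mpr
    intro a
    have h1 := (PySem.List.sorted_perm (xs.filter (fun x => decide (x < p))) (fun x => x) false).count_eq a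
    have h2 := (PySem.List.sorted_perm (xs.filter (fun x => decide (p < x))) (fun x => x) false).count_eq a
    have hl : List.count a (xs.filter (fun x => decide (x < p)))
        = if a < p then List.count a xs else 0 := by
      split
      · exact List.count_filter (by simpa)
      · rename_i hna
        exact List.count_eq_zero.mpr (fun hm => hna (by simpa using (List.mem_filter.mp hm).2))
    have hgg : List.count a (xs.filter (fun x => decide (p < x)))
        = if p < a then List.count a xs else 0 := by
      split
      · exact List.count_filter (by simpa)
      · rename_i hna
        exact List.count_eq_zero.mpr (fun hm => hna (by simpa using (List.mem_filter.mp hm).2))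
    simp only [List.count_append, h1, h2, hl, hgg, List.count_replicate]
    rcases lt_trichotomy a p with h | h | h
    · split_ifs <;> simp_all <;> omega
    · subst h; split_ifs <;> simp_all
    · split_ifs <;> simp_all <;> omega
  · apply List.pairwise_append.mpr
    refine ⟨PySem.List.sorted_pairwise _ _, ?_, ?_⟩
    · apply List.pairwise_append.mpr
      refine ⟨List.pairwise_replicate.mpr (by simp), PySem.List.sorted_pairwise _ _, ?_⟩
      intro x hx y hy
      have hx' := List.eq_of_mem_replicate hx
      have hy' : p < y := by
        have := (PySem.List.mem_sorted _ _ _ _).mp hy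
        simpa using (List.mem_filter.mp this).2
      omega
    · intro x hx y hy
      have hx' : x < p := by
        have := (PySem.List.mem_sorted _ _ _ _).mp hx
        simpa using (List.mem_filter.mp this).2
      rcases List.mem_append.mp hy with hy | hy
      · have := List.eq_of_mem_replicate hy; omega
      · have hy' : p < y := by
          have := (PySem.List.mem_sorted _ _ _ _).mp hy
          simpa using (List.mem_filter.mp this).2
        omega

-- One-step unfolding of sumSmallest on a non-trivial input, with its local lets expanded.
theorem sumSmallest_unfold (n : Int) (xs : List Int) (h : ¬(n ≤ 0 ∨ xs = [])) :
    sumSmallest n xs =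
      if n ≤ ((xs.filter (fun x => decide (x < PySem.List.pyGetD xs 0 0))).length : Int) then
        sumSmallest n (xs.filter (fun x => decide (x < PySem.List.pyGetD xs 0 0)))
      else
        (xs.filter (fun x => decide (x < PySem.List.pyGetD xs 0 0))).sum
        + PySem.List.pyGetD xs 0 0 *
            min (n - ((xs.filter (fun x => decide (x < PySem.List.pyGetD xs 0 0))).length : Int))
              ((xs.length : Int)
                - ((xs.filter (fun x => decide (x < PySem.List.pyGetD xs 0 0))).length : Int)
                - ((xs.filter (fun x => decide (PySem.List.pyGetD xs 0 0 < x))).length : Int))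
        + sumSmallest
            (n - ((xs.filter (fun x => decide (x < PySem.List.pyGetD xs 0 0))).length : Int)
              - ((xs.length : Int)
                - ((xs.filter (fun x => decide (x < PySem.List.pyGetD xs 0 0))).length : Int)
                - ((xs.filter (fun x => decide (PySem.List.pyGetD xs 0 0 < x))).length : Int)))
            (xs.filter (fun x => decide (PySem.List.pyGetD xs 0 0 < x))) := by
  rw [sumSmallest, if_neg h]

-- sumSmallest n xs is the sum of the first n elements of sorted(xs).
theorem pv_sumSmallest (xs : List Int) (n : Int) :
    sumSmallest n xs = ((PySem.List.sorted xs (fun x => x) false).take n.toNat).sum := by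
  induction hL : xs.length using Nat.strong_induction_on generalizing xs n with
  | _ L ih =>
  subst hL
  by_cases h0 : n ≤ 0 ∨ xs = []
  · rw [sumSmallest, if_pos h0]
    rcases h0 with h0 | h0
    · simp [Int.toNat_of_nonpos h0]
    · subst h0
      have : PySem.List.sorted ([] : List Int) (fun x => x) false = [] := by
        have := PySem.List.sorted_perm ([] : List Int) (fun x => x) false
        simpa using this.eq_nil
      simp [this]
  · rw [sumSmallest_unfold n xs h0]
    push_neg at h0
    obtain ⟨hn0, hne⟩ := h0
    set p := PySem.List.pyGetD xs 0 0 with hp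
    set less := xs.filter (fun x => decide (x < p)) with hless
    set greater := xs.filter (fun x => decide (p < x)) with hgr
    have hdec := pv_sorted_decomp xs p
    rw [← hless, ← hgr] at hdec
    have hlenA : (PySem.List.sorted less (fun x => x) false).length = less.length :=
      PySem.List.length_sorted _ _ _
    have hlenC : (PySem.List.sorted greater (fun x => x) false).length = greater.length :=
      PySem.List.length_sorted _ _ _
    have hlensum : less.length + xs.count p + greater.length = xs.length := by
      have := congrArg List.length hdec
      simp only [List.length_append, List.length_replicate, hlenA, hlenC,
        PySem.List.length_sorted] at this
      omega
    have hlessL : less.length < xs.length := by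
      rcases xs with _ | ⟨a, t⟩
      · exact absurd rfl hne
      · simpa [hless] using List.length_filter_lt_length_iff_exists.mpr
          ⟨a, List.mem_cons_self, by simp [hp, PySem.List.pyGetD, PySem.List.pyGet?, PySem.List.pyIdx?]⟩
    have hgrL : greater.length < xs.length := by
      rcases xs with _ | ⟨a, t⟩
      · exact absurd rfl hne
      · simpa [hgr] using List.length_filter_lt_length_iff_exists.mpr
          ⟨a, List.mem_cons_self, by simp [hp, PySem.List.pyGetD, PySem.List.pyGet?, PySem.List.pyIdx?]⟩
    by_cases hcase : n ≤ (less.length : Int)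
    · rw [if_pos hcase, ih less.length hlessL less n rfl, hdec]
      rw [List.take_append_of_le_length (by omega : n.toNat ≤ (PySem.List.sorted less (fun x => x) false).length)]
    · rw [if_neg hcase]
      push_neg at hcase
      rw [ih greater.length hgrL greater _ rfl, hdec]
      rw [List.take_append, List.take_append]
      rw [List.take_of_length_le (by omega : (PySem.List.sorted less (fun x => x) false).length ≤ n.toNat)]
      rw [List.take_replicate]
      simp only [List.sum_append, List.sum_replicate, hlenA, List.length_replicate]
      have hsumless : (PySem.List.sorted less (fun x => x) false).sum = less.sum :=
        (PySem.List.sorted_perm less (fun x => x) false).sum_eq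
      have hcnt : ((xs.length : Int) - less.length - greater.length) = (xs.count p : Int) := by
        omega
      rw [hsumless, hcnt]
      have hrest : (n - (less.length : Int) - (xs.count p : Int)).toNat
          = n.toNat - less.length - xs.count p := by omega
      rw [hrest]
      have hmul : p * min (n - (less.length : Int)) ((xs.count p : Int))
          = min ((n.toNat : Int) - (less.length : Int)) ((xs.count p : Int)) * p := by
        rw [Int.toNat_of_nonneg (by omega : (0:Int) ≤ n), mul_comm]
      rw [hmul]
      have hmincast : ((min (n.toNat - less.length) (xs.count p) : Nat) : Int)
          = min ((n.toNat : Int) - (less.length : Int)) ((xs.count p : Int)) := by omega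
      rw [nsmul_eq_mul, hmincast]
      ring

-- ===== VERDICT (by name: the statement is the Claim_ definition above) =====
theorem compute_spec : Claim_equal_compute := by
  intro N K coords _ hpre
  unfold Spec_compute compute compute_alt
  by_cases hKN : K ≥ N
  · simp [hKN]
  · simp only [if_neg hKN]
    push_neg at hKN
    set g := (PySem.List.pyRange 1 N 1).map (fun i =>
      PySem.List.pyGetD (PySem.List.sorted coords (fun x => x) false) i 0 -
        PySem.List.pyGetD (PySem.List.sorted coords (fun x => x) false) (i - 1) 0) with hg
    have hglen : g.length = (N - 1).toNat := by
      simp [hg, PySem.List.length_pyRange_one]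
    have hk1 : (K - 1).toNat ≤ (PySem.List.sorted g (fun x => x) false).length := by
      rw [PySem.List.length_sorted, hglen]
      rcases hpre with h | h | h
      · omega
      · omega
      · omega
    have hrange : PySem.List.pyRange 0 (K - 1) 1 = PySem.List.pyRange 0 (((K - 1).toNat : Nat) : Int) 1 := by
      by_cases h0 : 0 ≤ K - 1
      · rw [Int.toNat_of_nonneg h0]
      · rw [PySem.List.pyRange_one_eq_nil (by omega), PySem.List.pyRange_one_eq_nil (by omega)]
    rw [hrange, pv_popFold _ _ hk1, pv_sumSmallest]
    have hslen : (PySem.List.sorted g (fun x => x) false).length = (N - 1).toNat := by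
      rw [PySem.List.length_sorted, hglen]
    by_cases hb : (N - K).toNat ≤ (N - 1).toNat
    · have harg : (PySem.List.sorted g (fun x => x) false).length - (K - 1).toNat = (N - K).toNat := by
        rw [hslen]; omega
      rw [harg]
    · rw [List.take_of_length_le (by rw [hslen]; omega),
        List.take_of_length_le (by rw [hslen]; omega)]
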